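-- pv_equiv track=rewrite | github.com/caseyj/AdventOfCode | src/day_1/checkSummer.py | get_manhattan_edit
-- ===== SOURCE A (Python) =====
-- from collections import Counter, defaultdict
--
-- def manhattan_vect_strings(str_a: str, str_b: str)->[int]:
--     """
--     Function that finds the edit vector for two strings, for a given element 0
--     means the two strings have the same character in the same place. For a 1
--     this means the characters differ.
--
--     Args:
--         str_a: str First string to be considered equal length to str_b
--         str_b: str Second string to be considered equal length to str_a
--     Returns
--         A list of integers 0 or 1 for each space
--     """
--     if len(str_a) == len(str_b):
--         edit_vec = []
--         for index in range(0,len(str_a)):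
--             if str_a[index] == str_b[index]:
--                 edit_vec.append(0)
--             else:
--                 edit_vec.append(1)
--         return edit_vec
--     else:
--         raise ValueError
--
-- def manhattan_dist(str_a: str, str_b: str)->int:
--     return sum(manhattan_vect_strings(str_a, str_b))
--
-- def manhattan_grid(box_ids: [str])->defaultdict:
--     track_id_grid = defaultdict(list)
--     for box_id_0 in range(0,len(box_ids)):
--         for box_id_1 in range(box_id_0+1, len(box_ids)):
--             track_id_grid[manhattan_dist(box_ids[box_id_0],box_ids[box_id_1])].append([box_id_0,box_id_1])
--     return track_id_grid
--
-- def get_smallest_key(box_ids: [str])->[int]: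
--     manhattan_grids = manhattan_grid(box_ids)
--     keys = sorted(list(manhattan_grids.keys()))
--     return manhattan_grids[keys[0]][0]
--
-- def get_manhattan_edit(box_ids: [str])->str:
--     indices = get_smallest_key(box_ids)
--     nstr = box_ids[indices[0]]
--     edit = manhattan_vect_strings(box_ids[indices[0]], box_ids[indices[1]])
--     while(True):
--         try:
--             ind = edit.index(1)
--             nstr = nstr[:ind] + nstr[ind+1:]
--             edit = edit[:ind] + edit[ind+1:]
--         except ValueError:
--             break
--
--     return nstr
-- ===== SOURCE B (Python) =====
-- def get_manhattan_edit(box_ids):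
--     n = len(box_ids)
--     best = None  # (distance, i, j); first pair with strictly smaller distance wins
--     for i in range(n):
--         for j in range(i + 1, n):
--             a, b = box_ids[i], box_ids[j]
--             if len(a) != len(b):
--                 raise ValueError
--             d = sum(1 for x, y in zip(a, b) if x != y)
--             if best is None or d < best[0]:
--                 best = (d, i, j)
--     _, i, j = best
--     return ''.join(x for x, y in zip(box_ids[i], box_ids[j]) if x == y)
-- ===== Notes on version B (the rewrite author's own statement) =====
-- stated objective: simpler
-- what changed: Replaces the defaultdict grid of all pair distances plus key-sort plus repeated index/slice deletion loop by a single streaming pass that keeps the first strictly-smallest pair and builds the answer with one zip/filter join.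
import Mathlib
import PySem

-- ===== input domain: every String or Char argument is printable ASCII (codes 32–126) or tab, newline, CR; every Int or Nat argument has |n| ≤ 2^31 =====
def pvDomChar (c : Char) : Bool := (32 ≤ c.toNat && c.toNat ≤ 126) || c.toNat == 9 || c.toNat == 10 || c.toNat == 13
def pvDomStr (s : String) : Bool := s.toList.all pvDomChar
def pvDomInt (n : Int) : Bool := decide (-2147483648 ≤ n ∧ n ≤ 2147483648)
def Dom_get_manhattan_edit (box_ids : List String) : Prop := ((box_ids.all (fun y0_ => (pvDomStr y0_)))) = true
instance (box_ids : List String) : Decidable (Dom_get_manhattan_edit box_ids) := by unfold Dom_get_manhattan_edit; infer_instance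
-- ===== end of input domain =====

-- B replaces A's defaultdict grid of all pairwise distances + key sort + index/slice deletion
-- loop by one streaming pass keeping the first strictly-smallest pair and a zip/filter join (objective: simpler).

-- ===== PORT A =====
-- manhattan_vect_strings: none encodes the `raise ValueError` on unequal lengths
def pvVectA (str_a str_b : String) : Option (List Int) :=
  if PySem.Str.len str_a = PySem.Str.len str_b then
    some ((PySem.List.pyRange 0 (PySem.Str.len str_a) 1).foldl
      (fun edit_vec index =>
        edit_vec ++ [if PySem.Str.pyGet? str_a index = PySem.Str.pyGet? str_b index then (0 : Int) else 1])
      [])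
  else none

-- manhattan_dist (propagates the ValueError)
def pvDistA (str_a str_b : String) : Option Int :=
  (pvVectA str_a str_b).map List.sum

-- manhattan_grid: defaultdict(list); track_id_grid[d].append([i, j]); Option threads the ValueError
def pvGridA (box_ids : List String) : Option (PySem.Dict Int (List (List Int))) :=
  (PySem.List.pyRange 0 (box_ids.length : Int) 1).foldl
    (fun og box_id_0 =>
      (PySem.List.pyRange (box_id_0 + 1) (box_ids.length : Int) 1).foldl
        (fun og' box_id_1 =>
          og'.bind fun g =>
            (pvDistA (PySem.List.pyGetD box_ids box_id_0 "") (PySem.List.pyGetD box_ids box_id_1 "")).map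
              (fun d => g.modify d [] (fun l => l ++ [[box_id_0, box_id_1]])))
        og)
    (some PySem.Dict.empty)

-- get_smallest_key: sorted keys, keys[0] (IndexError → none), first pair of that bucket
def pvSmallA (box_ids : List String) : Option (List Int) :=
  (pvGridA box_ids).bind fun g =>
    let keys := PySem.List.sorted g.keys (fun x => x) false
    (PySem.List.pyGet? keys 0).bind fun k0 =>
      PySem.List.pyGet? (g.getD k0 []) 0

-- the while/try loop: repeatedly delete the first position whose edit entry is 1
-- (fuel = edit.length bounds the iterations: every iteration that recurses shortens edit by one)
def pvLoopA : Nat → List Char → List Int → List Char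
  | 0, nstr, _ => nstr
  | fuel + 1, nstr, edit =>
    match PySem.List.index? edit 1 with
    | none => nstr
    | some ind =>
      pvLoopA fuel
        (PySem.List.slice nstr none (some (ind : Int)) ++ PySem.List.slice nstr (some ((ind : Int) + 1)) none)
        (PySem.List.slice edit none (some (ind : Int)) ++ PySem.List.slice edit (some ((ind : Int) + 1)) none)

def get_manhattan_edit (box_ids : List String) : String :=
  match pvSmallA box_ids with
  | none => ""          -- A raises here (IndexError / ValueError); such inputs are outside Pre_
  | some indices =>
    -- indices is always a two-element list [i, j]; indices[0] / indices[1]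
    let i0 := PySem.List.pyGetD indices 0 0
    let i1 := PySem.List.pyGetD indices 1 0
    let nstr := PySem.List.pyGetD box_ids i0 ""
    match pvVectA nstr (PySem.List.pyGetD box_ids i1 "") with
    | none => ""        -- unreachable inside Pre_ (equal lengths)
    | some edit => String.mk (pvLoopA edit.length nstr.toList edit)

-- ===== PORT B =====
-- state: none = ValueError raised; some best with best = none until the first pair is seen
def get_manhattan_edit_alt (box_ids : List String) : String :=
  let n : Int := (box_ids.length : Int)
  let best :=
    (PySem.List.pyRange 0 n 1).foldl
      (fun st i =>
        (PySem.List.pyRange (i + 1) n 1).foldl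
          (fun (st' : Option (Option (Int × Int × Int))) j =>
            st'.bind fun b =>
              let a := PySem.List.pyGetD box_ids i ""
              let c := PySem.List.pyGetD box_ids j ""
              if PySem.Str.len a ≠ PySem.Str.len c then none   -- raise ValueError
              else
                -- d = sum(1 for x, y in zip(a, c) if x != y)
                let d : Int := ((a.toList.zip c.toList).countP (fun p => p.1 ≠ p.2) : Int)
                match b with
                | none => some (some (d, i, j))
                | some (d0, i0, j0) => some (if d < d0 then some (d, i, j) else some (d0, i0, j0)))
          st)
      (some (none : Option (Int × Int × Int)))
  match best with
  | some (some (_, i, j)) =>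
    -- ''.join(x for x, y in zip(box_ids[i], box_ids[j]) if x == y)
    String.mk ((((PySem.List.pyGetD box_ids i "").toList.zip (PySem.List.pyGetD box_ids j "").toList).filter
      (fun p => p.1 = p.2)).map (·.1))
  | _ => ""             -- B raises here (ValueError / TypeError on unpacking None); outside Pre_

-- ===== PRECONDITION & SPEC =====
-- Pre_ excludes exactly the inputs where A raises: fewer than two strings (IndexError on keys[0])
-- or two strings of different lengths (ValueError in manhattan_vect_strings).
def Pre_get_manhattan_edit (box_ids : List String) : Prop :=
  2 ≤ box_ids.length ∧ ∀ s ∈ box_ids, ∀ t ∈ box_ids, s.length = t.length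
instance (box_ids : List String) : Decidable (Pre_get_manhattan_edit box_ids) := by
  unfold Pre_get_manhattan_edit; infer_instance

def pvWitness_get_manhattan_edit : List String := ["axc", "abc", "xyz"]

def Spec_get_manhattan_edit (box_ids : List String) (out : String) : Prop := out = get_manhattan_edit_alt box_ids
instance (box_ids : List String) (out : String) : Decidable (Spec_get_manhattan_edit box_ids out) := by unfold Spec_get_manhattan_edit; infer_instance

-- ===== CLAIM (what is proved, stated in full; the proofs are below) =====
def Claim_equal_get_manhattan_edit : Prop := ∀ (box_ids : List String), Dom_get_manhattan_edit box_ids → Pre_get_manhattan_edit box_ids → Spec_get_manhattan_edit box_ids (get_manhattan_edit box_ids)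


-- ===== LEMMAS AND PROOFS =====

-- the flat list of index pairs (i, j), i < j, in A's and B's common traversal order
def pvPairs (n : Int) : List (Int × Int) :=
  (PySem.List.pyRange 0 n 1).flatMap (fun i => (PySem.List.pyRange (i + 1) n 1).map (fun j => (i, j)))

-- the Hamming distance both programs compute for the index pair p
def pvD (L : List String) (p : Int × Int) : Int :=
  (((PySem.List.pyGetD L p.1 "").toList.zip (PySem.List.pyGetD L p.2 "").toList).countP
    (fun q => q.1 ≠ q.2) : Int)

-- A's grid as a plain fold over the flat pair list
def pvGrid (L : List String) : PySem.Dict Int (List (List Int)) :=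
  (pvPairs (L.length : Int)).foldl
    (fun g p => g.modify (pvD L p) [] (fun l => l ++ [[p.1, p.2]])) PySem.Dict.empty

lemma pvMemPairs {n : Int} {p : Int × Int} (h : p ∈ pvPairs n) :
    0 ≤ p.1 ∧ p.1 < p.2 ∧ p.2 < n := by
  unfold pvPairs at h
  simp only [List.mem_flatMap, List.mem_map, PySem.List.mem_pyRange_one] at h
  obtain ⟨i, hi, j, hj, rfl⟩ := h
  exact ⟨hi.1, by omega, hj.2⟩

lemma pvPairs_ne_nil {n : Int} (hn : 2 ≤ n) : pvPairs n ≠ [] := by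
  have : ((0 : Int), (1 : Int)) ∈ pvPairs n := by
    unfold pvPairs
    simp only [List.mem_flatMap, List.mem_map, PySem.List.mem_pyRange_one]
    exact ⟨0, ⟨le_refl _, by omega⟩, 1, ⟨by omega, by omega⟩, rfl⟩
  exact List.ne_nil_of_mem this

lemma pvGet_mem {L : List String} {i : Int} (h0 : 0 ≤ i) (h1 : i < (L.length : Int)) :
    PySem.List.pyGetD L i "" ∈ L := by
  rw [PySem.List.pyGetD_of_nonneg _ _ h0]
  have hlt : i.toNat < L.length := by omega
  rw [List.getD_eq_getElem _ _ hlt]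
  exact List.getElem_mem hlt

lemma pvVectA_eq (a b : String) (h : a.toList.length = b.toList.length) :
    pvVectA a b =
      some ((a.toList.zip b.toList).map (fun q => if q.1 = q.2 then (0 : Int) else 1)) := by
  unfold pvVectA
  rw [if_pos (by simp [PySem.Str.len_eq, h])]
  rw [PySem.List.foldl_append_singleton_eq_map]
  simp only [List.nil_append, PySem.Str.len_eq, PySem.List.pyRange_zero_natCast, List.map_map]
  congr 1
  apply List.ext_getElem
  · simp [h]
  · intro k hk1 hk2
    simp only [List.getElem_map, List.getElem_range, Function.comp_apply, List.getElem_zip]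
    have hka : k < a.toList.length := by simpa using hk1
    have hkb : k < b.toList.length := by omega
    simp only [PySem.Str.pyGet?_natCast, List.getElem?_eq_getElem hka,
      List.getElem?_eq_getElem hkb, Option.some.injEq]

lemma pvDistA_eq (a b : String) (h : a.toList.length = b.toList.length) :
    pvDistA a b = some (((a.toList.zip b.toList).countP (fun q => q.1 ≠ q.2) : Int)) := by
  unfold pvDistA
  rw [pvVectA_eq a b h]
  simp only [Option.map_some, Option.some.injEq]
  have : (fun q : Char × Char => if q.1 = q.2 then (0 : Int) else 1)
      = (fun q : Char × Char => if (decide (q.1 ≠ q.2)) = true then (1 : Int) else 0) := by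
    funext q; by_cases hq : q.1 = q.2 <;> simp [hq]
  rw [this, PySem.List.sum_map_ite_one_zero]

-- an Option-threaded fold whose step never fails is some of the plain fold
lemma pvFoldl_some {α σ : Type} (l : List α) (f : σ → α → Option σ) (g : σ → α → σ)
    (h : ∀ s, ∀ x ∈ l, f s x = some (g s x)) :
    ∀ s0, l.foldl (fun o x => o.bind (fun s => f s x)) (some s0) = some (l.foldl g s0) := by
  induction l with
  | nil => intro s0; rfl
  | cons x xs ih =>
    intro s0
    simp only [List.foldl_cons, Option.bind_some, h s0 x List.mem_cons_self]
    exact ih (fun s y hy => h s y (List.mem_cons_of_mem _ hy)) (g s0 x)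

lemma pvLenPair {L : List String} (hlen : ∀ s ∈ L, ∀ t ∈ L, s.length = t.length)
    {p : Int × Int} (hp : p ∈ pvPairs (L.length : Int)) :
    (PySem.List.pyGetD L p.1 "").toList.length = (PySem.List.pyGetD L p.2 "").toList.length := by
  obtain ⟨h1, h2, h3⟩ := pvMemPairs hp
  have ha := pvGet_mem h1 (by omega : p.1 < (L.length : Int))
  have hb := pvGet_mem (by omega : (0:Int) ≤ p.2) h3
  have h := hlen _ ha _ hb
  rw [← String.length_toList, ← String.length_toList] at h
  exact h

lemma pvGridA_eq {L : List String} (hlen : ∀ s ∈ L, ∀ t ∈ L, s.length = t.length) :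
    pvGridA L = some (pvGrid L) := by
  have h1 : pvGridA L = (pvPairs (L.length : Int)).foldl
      (fun og p => og.bind fun g =>
        (pvDistA (PySem.List.pyGetD L p.1 "") (PySem.List.pyGetD L p.2 "")).map
          (fun d => g.modify d [] (fun l => l ++ [[p.1, p.2]])))
      (some PySem.Dict.empty) := by
    unfold pvGridA pvPairs
    rw [List.foldl_flatMap]
    simp only [List.foldl_map]
  rw [h1]
  unfold pvGrid
  exact pvFoldl_some (pvPairs (L.length : Int))
    (fun g p => (pvDistA (PySem.List.pyGetD L p.1 "") (PySem.List.pyGetD L p.2 "")).map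
      (fun d => g.modify d [] (fun l => l ++ [[p.1, p.2]])))
    (fun g p => g.modify (pvD L p) [] (fun l => l ++ [[p.1, p.2]]))
    (fun s p hp => by simp only [pvDistA_eq _ _ (pvLenPair hlen hp)]; rfl)
    PySem.Dict.empty

lemma pvGrid_getD (L : List String) (c : Int) :
    (pvGrid L).getD c [] =
      ((pvPairs (L.length : Int)).filter (fun p => pvD L p == c)).map (fun p => [p.1, p.2]) := by
  unfold pvGrid
  have : (pvPairs (L.length : Int)).foldl
      (fun g p => g.modify (pvD L p) [] (fun l => l ++ [[p.1, p.2]])) PySem.Dict.empty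
      = ((pvPairs (L.length : Int)).map (fun p => (pvD L p, [p.1, p.2]))).foldl
        (fun g q => g.modify q.1 [] (fun l => l ++ [q.2])) PySem.Dict.empty := by
    rw [List.foldl_map]
  rw [this, PySem.Dict.getD_foldl_modify_append]
  simp [List.filter_map, Function.comp_def]

lemma pvGrid_keys (L : List String) :
    (pvGrid L).keys = PySem.Set.ofList ((pvPairs (L.length : Int)).map (pvD L)) := by
  unfold pvGrid
  rw [PySem.Dict.keys_foldl_modify_key (pvPairs (L.length : Int)) (pvD L) []
    (fun _ p => (fun l => l ++ [[p.1, p.2]])) PySem.Dict.empty]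
  rw [PySem.Dict.keys_empty, PySem.Set.ofList_eq_foldl]
  rfl

lemma pvFind?_congr {α : Type} {pr q : α → Bool} :
    ∀ (l : List α), (∀ x ∈ l, pr x = q x) → l.find? pr = l.find? q
  | [], _ => rfl
  | x :: xs, h => by
    have hx := h x List.mem_cons_self
    simp only [List.find?_cons, ← hx]
    cases hpx : pr x
    · exact pvFind?_congr xs (fun y hy => h y (List.mem_cons_of_mem _ hy))
    · rfl

-- the streaming strict-< fold keeps the first pair attaining the minimum
lemma pvStream_spec (L : List String) :
    ∀ (xs : List (Int × Int)) (t : Int × (Int × Int)), pvD L t.2 = t.1 →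
      (pvD L (xs.foldl (fun t p => if pvD L p < t.1 then (pvD L p, p) else t) t).2
          = (xs.foldl (fun t p => if pvD L p < t.1 then (pvD L p, p) else t) t).1)
      ∧ (xs.foldl (fun t p => if pvD L p < t.1 then (pvD L p, p) else t) t).1 ≤ t.1
      ∧ (∀ p ∈ xs, (xs.foldl (fun t p => if pvD L p < t.1 then (pvD L p, p) else t) t).1 ≤ pvD L p)
      ∧ ((xs.foldl (fun t p => if pvD L p < t.1 then (pvD L p, p) else t) t) = t
          ∨ ((xs.foldl (fun t p => if pvD L p < t.1 then (pvD L p, p) else t) t).1 < t.1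
             ∧ xs.find? (fun p => pvD L p ≤ (xs.foldl (fun t p => if pvD L p < t.1 then (pvD L p, p) else t) t).1)
                 = some (xs.foldl (fun t p => if pvD L p < t.1 then (pvD L p, p) else t) t).2)) := by
  intro xs
  induction xs with
  | nil => intro t ht; exact ⟨ht, le_refl _, by simp, Or.inl rfl⟩
  | cons y ys ih =>
    intro t ht
    by_cases hy : pvD L y < t.1
    · simp only [List.foldl_cons, if_pos hy]
      obtain ⟨i1, i2, i3, i4⟩ := ih (pvD L y, y) rfl
      refine ⟨i1, by simpa using le_trans i2 (le_of_lt hy), ?_, ?_⟩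
      · intro p hp
        rcases List.mem_cons.mp hp with rfl | hp'
        · simpa using i2
        · exact i3 p hp'
      · right
        constructor
        · exact lt_of_le_of_lt (by simpa using i2) hy
        · rcases i4 with heq | ⟨hlt, hfind⟩
          · rw [heq]
            simp
          · simp only [List.find?_cons]
            have : (decide (pvD L y ≤ (ys.foldl (fun t p => if pvD L p < t.1 then (pvD L p, p) else t) (pvD L y, y)).1)) = false := by
              simp only [decide_eq_false_iff_not, not_le]
              simpa using hlt
            simp only [this]
            exact hfind
    · simp only [List.foldl_cons, if_neg hy]
      obtain ⟨i1, i2, i3, i4⟩ := ih t ht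
      rw [not_lt] at hy
      refine ⟨i1, i2, ?_, ?_⟩
      · intro p hp
        rcases List.mem_cons.mp hp with rfl | hp'
        · exact le_trans i2 hy
        · exact i3 p hp'
      · rcases i4 with heq | ⟨hlt, hfind⟩
        · exact Or.inl heq
        · right
          refine ⟨hlt, ?_⟩
          simp only [List.find?_cons]
          have : (decide (pvD L y ≤ (ys.foldl (fun t p => if pvD L p < t.1 then (pvD L p, p) else t) t).1)) = false := by
            simp only [decide_eq_false_iff_not, not_le]
            exact lt_of_lt_of_le hlt hy
          simp only [this]
          exact hfind

-- lifting B's Option state over the list once the first pair has been seen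
lemma pvBFold_some (L : List String) :
    ∀ (xs : List (Int × Int)) (t : Int × (Int × Int)),
      xs.foldl (fun b p =>
          (match b with
            | none => some (pvD L p, p)
            | some t0 => if pvD L p < t0.1 then some (pvD L p, p) else some t0))
        (some t)
      = some (xs.foldl (fun t p => if pvD L p < t.1 then (pvD L p, p) else t) t)
  | [], _ => rfl
  | y :: ys, t => by
    simp only [List.foldl_cons]
    by_cases hy : pvD L y < t.1
    · simp only [if_pos hy]
      exact pvBFold_some L ys (pvD L y, y)
    · simp only [if_neg hy]
      exact pvBFold_some L ys t

-- A's deletion loop removes exactly the positions whose edit entry is 1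
lemma pvLoopA_spec :
    ∀ (fuel : Nat) (cs : List Char) (ed : List Int), cs.length = ed.length → ed.length ≤ fuel →
      pvLoopA fuel cs ed = ((cs.zip ed).filter (fun q => q.2 ≠ 1)).map (·.1) := by
  intro fuel
  induction fuel with
  | zero =>
    intro cs ed hl hf
    have : ed = [] := List.eq_nil_of_length_eq_zero (by omega)
    subst this
    have : cs = [] := List.eq_nil_of_length_eq_zero (by omega)
    subst this
    rfl
  | succ f ih =>
    intro cs ed hl hf
    show pvLoopA (f + 1) cs ed = _
    rw [pvLoopA]
    cases hidx : PySem.List.index? ed 1 with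
    | none =>
      have h1 : (1 : Int) ∉ ed := (PySem.List.index?_eq_none_iff ed 1).mp hidx
      have : (cs.zip ed).filter (fun q => q.2 ≠ 1) = cs.zip ed := by
        apply List.filter_eq_self.mpr
        intro q hq
        have := (List.of_mem_zip (a := q.1) (b := q.2) (by simpa using hq)).2
        simp only [decide_eq_true_eq]
        intro hq1
        exact h1 (hq1 ▸ this)
      rw [this, List.map_fst_zip (by omega)]
    | some ind =>
      dsimp only
      obtain ⟨pre, suf, hed, hpl, hnp⟩ := (PySem.List.index?_eq_some_iff ed 1 ind).mp hidx
      have hindlt : ind < ed.length := by rw [hed, ← hpl]; simp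
      have hslice_to : ∀ (l : List Int), PySem.List.slice l none (some (ind : Int)) = l.take ind := by
        intro l; rw [PySem.List.slice_to _ (by positivity)]; simp
      have hslice_toc : PySem.List.slice cs none (some (ind : Int)) = cs.take ind := by
        rw [PySem.List.slice_to _ (by positivity)]; simp
      have htn : ((ind : Int) + 1).toNat = ind + 1 := by omega
      have hslice_from : ∀ (l : List Int), PySem.List.slice l (some ((ind : Int) + 1)) none = l.drop (ind + 1) := by
        intro l
        rw [PySem.List.slice_from _ (by positivity), htn]
      have hslice_fromc : PySem.List.slice cs (some ((ind : Int) + 1)) none = cs.drop (ind + 1) := by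
        rw [PySem.List.slice_from _ (by positivity), htn]
      rw [hslice_toc, hslice_fromc, hslice_to, hslice_from]
      have hed_take : ed.take ind = pre := by rw [hed, ← hpl]; simp
      have hed_drop : ed.drop (ind + 1) = suf := by
        rw [hed, ← hpl]
        simp
      rw [hed_take, hed_drop]
      -- split cs at position ind
      have hindcs : ind < cs.length := by omega
      have hcs : cs = cs.take ind ++ cs[ind] :: cs.drop (ind + 1) := by
        conv_lhs => rw [← List.take_append_drop ind cs]
        congr 1
        rw [List.drop_eq_getElem_cons hindcs]
      have hlen_take : (cs.take ind).length = pre.length := by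
        rw [List.length_take]; omega
      rw [ih _ _ (by
            rw [List.length_append, List.length_append, List.length_take, List.length_drop,
              ← hpl]
            have := hed ▸ hl
            simp at this
            omega)
          (by
            have : ed.length = pre.length + 1 + suf.length := by rw [hed]; simp; omega
            rw [List.length_append]
            omega)]
      conv_rhs => rw [hcs, hed]
      rw [List.zip_append hlen_take, List.zip_append hlen_take]
      simp only [List.zip_cons_cons, List.filter_append, List.filter_cons]
      norm_num

-- the two final string computations coincide
lemma pvJoin_eq :
    ∀ (cs ds : List Char), cs.length = ds.length →
      ((cs.zip ((cs.zip ds).map (fun q => if q.1 = q.2 then (0 : Int) else 1))).filter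
          (fun q => q.2 ≠ 1)).map (·.1)
        = ((cs.zip ds).filter (fun q => q.1 = q.2)).map (·.1)
  | [], [], _ => rfl
  | [], _ :: _, h => by simp at h
  | _ :: _, [], h => by simp at h
  | c :: cs, d :: ds, h => by
    have h' : cs.length = ds.length := by simpa using h
    by_cases hcd : c = d
    · simp only [List.zip_cons_cons, List.map_cons, if_pos hcd, List.filter_cons]
      norm_num [hcd]
      simpa using pvJoin_eq cs ds h'
    · simp only [List.zip_cons_cons, List.map_cons, if_neg hcd, List.filter_cons]
      norm_num [hcd]
      simpa using pvJoin_eq cs ds h'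


-- both programs' nested i<j loops are one fold over the flat pair list
lemma pvNested_eq_pairs {σ : Type} (n : Int) (F : σ → Int × Int → σ) (s0 : σ) :
    (PySem.List.pyRange 0 n 1).foldl
      (fun st i => (PySem.List.pyRange (i + 1) n 1).foldl (fun st' j => F st' (i, j)) st) s0
    = (pvPairs n).foldl F s0 := by
  unfold pvPairs
  rw [List.foldl_flatMap]
  simp only [List.foldl_map]

-- ===== VERDICT (by name: the statement is the Claim_ definition above) =====
theorem get_manhattan_edit_spec : Claim_equal_get_manhattan_edit := by
  intro L _hdom hpre
  obtain ⟨hn2, hlen⟩ := hpre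
  unfold Spec_get_manhattan_edit
  have hn2' : (2 : Int) ≤ (L.length : Int) := by exact_mod_cast hn2
  obtain ⟨x, xs, hP⟩ : ∃ y ys, pvPairs (L.length : Int) = y :: ys := by
    cases h : pvPairs (L.length : Int) with
    | nil => exact absurd h (pvPairs_ne_nil hn2')
    | cons y ys => exact ⟨y, ys, rfl⟩
  set r := xs.foldl (fun t p => if pvD L p < t.1 then (pvD L p, p) else t) (pvD L x, x) with hr
  obtain ⟨s1, s2, s3, s4⟩ := pvStream_spec L xs (pvD L x, x) rfl
  rw [← hr] at s1 s2 s3 s4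
  have hrmem : r.2 ∈ x :: xs := by
    rcases s4 with heq | ⟨_, hf⟩
    · rw [heq]; exact List.mem_cons_self
    · exact List.mem_cons_of_mem _ (List.mem_of_find?_eq_some hf)
  have hrmin : ∀ p ∈ x :: xs, r.1 ≤ pvD L p := by
    intro p hp
    rcases List.mem_cons.mp hp with rfl | hp'
    · exact s2
    · exact s3 p hp'
  have hfind : (x :: xs).find? (fun p => pvD L p == r.1) = some r.2 := by
    rcases s4 with heq | ⟨hlt, hf⟩
    · rw [heq]
      simp only [List.find?_cons]
      simp
    · simp only [List.find?_cons]
      have hx : (pvD L x == r.1) = false := by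
        simp only [beq_eq_false_iff_ne, ne_eq]
        intro hc
        rw [hc] at hlt
        exact absurd hlt (lt_irrefl _)
      simp only [hx]
      rw [pvFind?_congr xs (fun p hp => ?_)]
      · exact hf
      · have h1 := s3 p hp
        by_cases h : pvD L p = r.1
        · simp [h]
        · have h2 : ¬ pvD L p ≤ r.1 := by omega
          simp [h, h2]
  -- the smallest sorted key is r.1
  have hds : ((pvGrid L).keys : List Int) = PySem.Set.ofList ((x :: xs).map (pvD L)) := by
    rw [pvGrid_keys, hP]
  obtain ⟨m, t', hs⟩ : ∃ m t', PySem.List.sorted ((pvGrid L).keys) (fun x => x) false = m :: t' := by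
    cases h : PySem.List.sorted ((pvGrid L).keys) (fun x => x) false with
    | nil =>
      rw [PySem.List.sorted_eq_nil_iff, hds] at h
      have : pvD L x ∈ PySem.Set.ofList ((x :: xs).map (pvD L)) := by
        rw [PySem.Set.mem_ofList]
        exact List.mem_map_of_mem List.mem_cons_self
      rw [h] at this
      exact absurd this (List.not_mem_nil)
    | cons m t' => exact ⟨m, t', rfl⟩
  have hm_le : ∀ y ∈ (x :: xs).map (pvD L), m ≤ y := by
    intro y hy
    have := PySem.List.key_head_sorted_le _ _ hs (y := y)
    rw [hds] at this
    exact this ((PySem.Set.mem_ofList _ _).mpr hy)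
  have hm_mem : m ∈ (x :: xs).map (pvD L) := by
    have : m ∈ PySem.List.sorted ((pvGrid L).keys) (fun x => x) false := by
      rw [hs]; exact List.mem_cons_self
    rw [PySem.List.mem_sorted, hds, PySem.Set.mem_ofList] at this
    exact this
  have hm_eq : m = r.1 := by
    apply le_antisymm
    · exact hm_le _ (s1 ▸ List.mem_map_of_mem hrmem)
    · obtain ⟨p, hp, hpm⟩ := List.mem_map.mp hm_mem
      exact hpm ▸ hrmin p hp
  -- A's selected indices are r.2
  have hsmall : pvSmallA L = some [r.2.1, r.2.2] := by
    unfold pvSmallA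
    rw [pvGridA_eq hlen]
    simp only [Option.bind_some, hs]
    have h0 : PySem.List.pyGet? (m :: t') 0 = some m := by
      rw [show (0 : Int) = ((0 : Nat) : Int) from rfl, PySem.List.pyGet?_natCast]
      rfl
    rw [h0]
    simp only [Option.bind_some]
    rw [pvGrid_getD, hP]
    rw [show (0 : Int) = ((0 : Nat) : Int) from rfl, PySem.List.pyGet?_natCast]
    rw [← List.head?_eq_getElem?, List.head?_map, List.head?_filter, hm_eq, hfind]
    rfl
  -- lengths of the selected strings
  have hrp : r.2 ∈ pvPairs (L.length : Int) := hP ▸ hrmem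
  have hlencs : (PySem.List.pyGetD L r.2.1 "").toList.length
      = (PySem.List.pyGetD L r.2.2 "").toList.length := pvLenPair hlen hrp
  -- reduce A
  rw [get_manhattan_edit, hsmall]
  dsimp only
  have hi0 : PySem.List.pyGetD [r.2.1, r.2.2] 0 0 = r.2.1 := by
    simp [PySem.List.pyGetD_ofNat']
  have hi1 : PySem.List.pyGetD [r.2.1, r.2.2] 1 0 = r.2.2 := by
    simp [PySem.List.pyGetD_ofNat']
  rw [hi0, hi1, pvVectA_eq _ _ hlencs]
  dsimp only
  rw [pvLoopA_spec _ _ _ (by simp [List.length_zip, hlencs]) (le_refl _)]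
  rw [pvJoin_eq _ _ hlencs]
  rw [get_manhattan_edit_alt]
  dsimp only
  rw [pvNested_eq_pairs (L.length : Int)
      (fun st' (p : Int × Int) => st'.bind fun b =>
        if PySem.Str.len (PySem.List.pyGetD L p.1 "") ≠ PySem.Str.len (PySem.List.pyGetD L p.2 "") then none
        else match b with
          | none => some (some (((List.countP (fun q => decide (q.1 ≠ q.2)) ((PySem.List.pyGetD L p.1 "").toList.zip (PySem.List.pyGetD L p.2 "").toList) : Int)), p.1, p.2))
          | some (d0, i0, j0) => some (if ((List.countP (fun q => decide (q.1 ≠ q.2)) ((PySem.List.pyGetD L p.1 "").toList.zip (PySem.List.pyGetD L p.2 "").toList) : Int)) < d0 then some (((List.countP (fun q => decide (q.1 ≠ q.2)) ((PySem.List.pyGetD L p.1 "").toList.zip (PySem.List.pyGetD L p.2 "").toList) : Int)), p.1, p.2) else some (d0, i0, j0)))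
      (some none)]
  rw [pvFoldl_some (pvPairs (L.length : Int))
      (fun b (p : Int × Int) =>
        if PySem.Str.len (PySem.List.pyGetD L p.1 "") ≠ PySem.Str.len (PySem.List.pyGetD L p.2 "") then none
        else match b with
          | none => some (some (((List.countP (fun q => decide (q.1 ≠ q.2)) ((PySem.List.pyGetD L p.1 "").toList.zip (PySem.List.pyGetD L p.2 "").toList) : Int)), p.1, p.2))
          | some (d0, i0, j0) => some (if ((List.countP (fun q => decide (q.1 ≠ q.2)) ((PySem.List.pyGetD L p.1 "").toList.zip (PySem.List.pyGetD L p.2 "").toList) : Int)) < d0 then some (((List.countP (fun q => decide (q.1 ≠ q.2)) ((PySem.List.pyGetD L p.1 "").toList.zip (PySem.List.pyGetD L p.2 "").toList) : Int)), p.1, p.2) else some (d0, i0, j0)))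
      (fun b (p : Int × Int) =>
        match b with
        | none => some (pvD L p, p)
        | some t0 => if pvD L p < t0.1 then some (pvD L p, p) else some t0)
      (fun b p hp => by
        have hl := pvLenPair hlen hp
        dsimp only
        rw [if_neg (by simp [PySem.Str.len_eq, hl])]
        cases b with
        | none => rfl
        | some t0 => rfl)
      none]
  rw [hP, List.foldl_cons]
  dsimp only
  rw [pvBFold_some L xs (pvD L x, x), ← hr]
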